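-- pv_equiv track=rewrite | github.com/BergBrae/autocast | source_apis/xprime_source.py | _get_media_type_from_url
-- ===== SOURCE A (Python) =====
-- def _get_media_type_from_url(url: str) -> str:
--     """
--     Attempts to derive the media type from the URL.
--
--     Args:
--         url: The stream URL
--
--     Returns:
--         The media type (e.g., 'mp4', 'mkv'), defaults to 'mp4'
--     """
--     try:
--         # Remove query parameters
--         path_part = url.split("?")[0].lower()
--
--         # Check for common video extensions
--         video_extensions = [
--             "mp4",
--             "mkv",
--             "avi",
--             "mov",
--             "wmv",
--             "flv",
--             "webm",
--             "m3u8",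
--         ]
--
--         for ext in video_extensions:
--             if path_part.endswith(f".{ext}"):
--                 return ext
--
--         # Check if extension is in the path
--         if "." in path_part:
--             potential_ext = path_part.split(".")[-1]
--             if len(potential_ext) <= 4 and potential_ext.isalnum():
--                 return potential_ext
--     except:
--         pass
--
--     # Default to mp4 if unable to determine
--     return "mp4"
-- ===== SOURCE B (Python) =====
-- def _get_media_type_from_url(url: str) -> str:
--     """
--     Attempts to derive the media type from the URL.
--
--     Args:
--         url: The stream URL
--
--     Returns:
--         The media type (e.g., 'mp4', 'mkv'), defaults to 'mp4'
--     """
--     path_part = url.split("?")[0].lower()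
--     i = path_part.rfind(".")
--     if i != -1:
--         ext = path_part[i + 1:]
--         if len(ext) <= 4 and ext.isalnum():
--             return ext
--     return "mp4"
-- ===== Notes on version B (the rewrite author's own statement) =====
-- stated objective: simpler
-- what changed: B drops the hard-coded extension list and its endswith loop entirely: it finds the last dot once with rfind and returns the suffix when it is a short alphanumeric token, since every listed extension already satisfies that general check.
import Mathlib
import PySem

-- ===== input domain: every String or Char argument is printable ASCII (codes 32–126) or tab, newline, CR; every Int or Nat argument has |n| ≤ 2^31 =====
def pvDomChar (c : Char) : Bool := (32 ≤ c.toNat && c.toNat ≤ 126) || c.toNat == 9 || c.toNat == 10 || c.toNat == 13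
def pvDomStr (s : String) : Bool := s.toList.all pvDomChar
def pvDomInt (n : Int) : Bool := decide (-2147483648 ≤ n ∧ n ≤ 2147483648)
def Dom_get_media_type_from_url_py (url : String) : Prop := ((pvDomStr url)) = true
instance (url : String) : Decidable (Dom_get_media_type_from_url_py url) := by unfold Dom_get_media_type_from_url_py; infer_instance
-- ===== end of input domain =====

-- B derives the extension in one rfind pass (last-dot suffix, ≤4 alnum chars) instead of A's
-- hard-coded extension list with an endswith loop; objective: simpler, same result.


-- ===== PORT A =====
-- the `for ext in video_extensions: if path_part.endswith(f".{ext}"): return ext` loop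
def pvExtLoop (p : List Char) : List (List Char) → Option (List Char)
  | [] => none
  | e :: rest => if PySem.Chars.endswith p ('.' :: e) then some e else pvExtLoop p rest

def get_media_type_from_url_py (url : String) : String :=
  match PySem.Chars.split? url.toList ['?'] with
  | none => "mp4"                 -- unreachable ("?" is non-empty); bare `except: pass` → default
  | some pieces =>
    match PySem.List.pyGet? pieces 0 with
    | none => "mp4"               -- IndexError would be caught by the bare except
    | some first =>
      let path_part := PySem.Chars.lower first
      match pvExtLoop path_part ["mp4".toList, "mkv".toList, "avi".toList, "mov".toList,
                                 "wmv".toList, "flv".toList, "webm".toList, "m3u8".toList] with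
      | some e => String.ofList e
      | none =>
        if PySem.Chars.isIn ['.'] path_part then
          match PySem.List.pyGet? (PySem.Chars.splitOn path_part ['.']) (-1) with
          | none => "mp4"         -- IndexError would be caught by the bare except
          | some potential_ext =>
            if decide (potential_ext.length ≤ 4) && PySem.Chars.strIsalnum potential_ext then
              String.ofList potential_ext
            else "mp4"
        else "mp4"

-- ===== PORT B =====
def get_media_type_from_url_py_alt (url : String) : String :=
  match PySem.Chars.split? url.toList ['?'] with
  | none => "mp4"                 -- unreachable ("?" is non-empty)
  | some pieces =>
    match PySem.List.pyGet? pieces 0 with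
    | none => "mp4"               -- unreachable (split always yields at least one piece)
    | some first =>
      let path_part := PySem.Chars.lower first
      let i := PySem.Chars.rfind path_part ['.']
      if i ≠ -1 then
        let ext := PySem.Chars.slice path_part (some (i + 1)) none
        if decide (ext.length ≤ 4) && PySem.Chars.strIsalnum ext then String.ofList ext
        else "mp4"
      else "mp4"

-- ===== PRECONDITION & SPEC =====
def Spec_get_media_type_from_url_py (url : String) (out : String) : Prop := out = get_media_type_from_url_py_alt url
instance (url : String) (out : String) : Decidable (Spec_get_media_type_from_url_py url out) := by unfold Spec_get_media_type_from_url_py; infer_instance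

-- ===== CLAIM (what is proved, stated in full; the proofs are below) =====
def Claim_equal_get_media_type_from_url_py : Prop := ∀ (url : String), Dom_get_media_type_from_url_py url → Spec_get_media_type_from_url_py url (get_media_type_from_url_py url)

-- ===== LEMMAS AND PROOFS =====

-- every list of characters is dot-free or splits at its LAST dot
lemma pvLastDot (p : List Char) :
    '.' ∉ p ∨ ∃ a b : List Char, p = a ++ '.' :: b ∧ '.' ∉ b := by
  induction p with
  | nil => exact Or.inl (by simp)
  | cons c p ih =>
    rcases ih with h | ⟨a, b, rfl, hb⟩
    · by_cases hc : c = '.'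
      · exact Or.inr ⟨[], p, by simp [hc], h⟩
      · exact Or.inl (by simp [h, Ne.symm hc])
    · exact Or.inr ⟨c :: a, b, rfl, hb⟩

lemma pvRfindGo_none {p : List Char} (h : '.' ∉ p) (k : Nat) :
    PySem.Chars.rfind.go p ['.'] k = -1 := by
  induction k with
  | zero =>
    rw [PySem.Chars.rfind.go]
    split
    · next hpre =>
      exfalso
      rcases (List.isPrefixOf_iff_prefix.mp hpre) with ⟨t, ht⟩
      exact h (by simp [← ht])
    · rfl
  | succ j ih =>
    rw [PySem.Chars.rfind.go]
    split
    · next hpre =>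
      exfalso
      rcases (List.isPrefixOf_iff_prefix.mp hpre) with ⟨t, ht⟩
      have hm : '.' ∈ p.drop (j + 1) := by simp [← ht]
      exact h (List.mem_of_mem_drop hm)
    · exact ih

lemma pvRfindGo_eq {a b : List Char} (hb : '.' ∉ b) (k : Nat) (hk : a.length ≤ k) :
    PySem.Chars.rfind.go (a ++ '.' :: b) ['.'] k = (a.length : Int) := by
  induction k with
  | zero =>
    have ha : a = [] := List.eq_nil_of_length_eq_zero (Nat.le_zero.mp hk)
    subst ha
    rw [PySem.Chars.rfind.go]
    simp
  | succ j ih =>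
    rw [PySem.Chars.rfind.go]
    by_cases hj : a.length = j + 1
    · have hpre : ['.'].isPrefixOf ((a ++ '.' :: b).drop (j + 1)) = true := by
        rw [← hj, List.drop_left]
        simp
      simp [hj]
    · have hlt : a.length ≤ j := by omega
      have hnp : ¬ (['.'].isPrefixOf ((a ++ '.' :: b).drop (j + 1)) = true) := by
        intro hpre
        rcases (List.isPrefixOf_iff_prefix.mp hpre) with ⟨t, ht⟩
        have hmem : '.' ∈ (a ++ '.' :: b).drop (j + 1) := by simp [← ht]
        rw [List.drop_append] at hmem
        have h1 : a.drop (j + 1) = [] := List.drop_eq_nil_of_le (by omega)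
        rw [h1, List.nil_append] at hmem
        have h2 : j + 1 - a.length = (j - a.length) + 1 := by omega
        rw [h2, List.drop_succ_cons] at hmem
        exact hb (List.mem_of_mem_drop hmem)
      simp only [hnp]
      exact ih hlt

lemma pvExtLoop_none {p : List Char} (h : '.' ∉ p) (l : List (List Char)) :
    pvExtLoop p l = none := by
  induction l with
  | nil => rfl
  | cons e rest ih =>
    simp only [pvExtLoop]
    have hne : ¬ (PySem.Chars.endswith p ('.' :: e) = true) := by
      intro hs
      have hsuf : ('.' :: e) <:+ p := (PySem.Chars.endswith_iff _ _).mp hs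
      exact h (hsuf.subset (by simp))
    simp [hne, ih]

lemma pvExtLoop_some {p e : List Char} :
    ∀ {l : List (List Char)}, pvExtLoop p l = some e →
      PySem.Chars.endswith p ('.' :: e) = true ∧ e ∈ l := by
  intro l
  induction l with
  | nil => intro h; cases h
  | cons e' rest ih =>
    intro h
    simp only [pvExtLoop] at h
    by_cases hc : PySem.Chars.endswith p ('.' :: e') = true
    · rw [if_pos hc] at h
      cases h
      exact ⟨hc, by simp⟩
    · rw [if_neg hc] at h
      rcases ih h with ⟨h1, h2⟩
      exact ⟨h1, by simp [h2]⟩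

-- a dot-headed suffix whose tail has no dot IS the suffix after the last dot
lemma pvSuffixUnique {a b e : List Char} (hb : '.' ∉ b) (he : '.' ∉ e)
    (hs : ('.' :: e) <:+ (a ++ '.' :: b)) : e = b := by
  have hsb : ('.' :: b) <:+ (a ++ '.' :: b) := ⟨a, rfl⟩
  rcases List.suffix_or_suffix_of_suffix hs hsb with h | h
  · rcases List.suffix_cons_iff.mp h with h' | h'
    · injection h'
    · exact absurd (h'.subset (by simp)) hb
  · rcases List.suffix_cons_iff.mp h with h' | h'
    · injection h'.symm
    · exact absurd (h'.subset (by simp)) he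

-- splitOn.go on dot-free input: one final piece
lemma pvSplitGo_noSep :
    ∀ (fuel : Nat) (l cur : List Char) (acc : List (List Char)), '.' ∉ l →
      PySem.Chars.splitOn.go ['.'] fuel l cur acc = ((cur.reverse ++ l) :: acc).reverse := by
  intro fuel
  induction fuel with
  | zero => intro l cur acc _; rw [PySem.Chars.splitOn.go.eq_def]
  | succ f ih =>
    intro l cur acc h
    match l with
    | [] => rw [PySem.Chars.splitOn.go.eq_def]; simp
    | c :: rest =>
      rw [PySem.Chars.splitOn.go.eq_def]
      have hc : c ≠ '.' := fun hc => h (by simp [hc])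
      have hnp : ¬ (['.'].isPrefixOf (c :: rest) = true) := by
        intro hpre
        rcases (List.isPrefixOf_iff_prefix.mp hpre) with ⟨t, ht⟩
        exact hc (by cases ht; rfl)
      simp only [hnp]
      rw [ih rest (c :: cur) acc (fun hm => h (by simp [hm]))]
      simp

-- the last piece of splitOn at the last dot is the dot-free tail
lemma pvSplitGo_last {b : List Char} (hb : '.' ∉ b) :
    ∀ (fuel : Nat) (x cur : List Char) (acc : List (List Char)), x.length < fuel →
      (PySem.Chars.splitOn.go ['.'] fuel (x ++ '.' :: b) cur acc).getLast? = some b := by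
  intro fuel
  induction fuel with
  | zero => intro x cur acc hx; omega
  | succ f ih =>
    intro x cur acc hx
    match x with
    | [] =>
      rw [PySem.Chars.splitOn.go.eq_def]
      have hpre : ['.'].isPrefixOf ('.' :: b) = true := by simp
      simp only [List.nil_append, hpre, if_pos]
      rw [show ('.' :: b).drop ['.'].length = b from rfl]
      rw [pvSplitGo_noSep f b [] (cur.reverse :: acc) hb]
      simp
    | c :: x' =>
      rw [PySem.Chars.splitOn.go.eq_def]
      by_cases hc : c = '.'
      · subst hc
        have hpre : ['.'].isPrefixOf ('.' :: (x' ++ '.' :: b)) = true := by simp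
        simp only [List.cons_append, hpre, if_pos]
        rw [show ('.' :: (x' ++ '.' :: b)).drop ['.'].length = x' ++ '.' :: b from rfl]
        exact ih x' [] (cur.reverse :: acc) (by simp at hx; omega)
      · have hnp : ¬ (['.'].isPrefixOf (c :: (x' ++ '.' :: b)) = true) := by
          intro hpre
          rcases (List.isPrefixOf_iff_prefix.mp hpre) with ⟨t, ht⟩
          exact hc (by cases ht; rfl)
        simp only [List.cons_append, hnp]
        exact ih x' (c :: cur) acc (by simp at hx ⊢; omega)

-- dot present: rfind finds the last dot
lemma pvRfind_eq {a b : List Char} (hb : '.' ∉ b) :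
    PySem.Chars.rfind (a ++ '.' :: b) ['.'] = (a.length : Int) := by
  unfold PySem.Chars.rfind
  exact pvRfindGo_eq hb _ (by simp)

-- the two bodies agree for every lowered path string p
lemma pvBody_eq (p : List Char) :
    (match pvExtLoop p ["mp4".toList, "mkv".toList, "avi".toList, "mov".toList,
                        "wmv".toList, "flv".toList, "webm".toList, "m3u8".toList] with
      | some e => String.ofList e
      | none =>
        if PySem.Chars.isIn ['.'] p then
          match PySem.List.pyGet? (PySem.Chars.splitOn p ['.']) (-1) with
          | none => "mp4"
          | some potential_ext =>
            if decide (potential_ext.length ≤ 4) && PySem.Chars.strIsalnum potential_ext then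
              String.ofList potential_ext
            else "mp4"
        else "mp4")
    =
    (if PySem.Chars.rfind p ['.'] ≠ -1 then
       if decide ((PySem.Chars.slice p (some (PySem.Chars.rfind p ['.'] + 1)) none).length ≤ 4) &&
            PySem.Chars.strIsalnum (PySem.Chars.slice p (some (PySem.Chars.rfind p ['.'] + 1)) none) then
         String.ofList (PySem.Chars.slice p (some (PySem.Chars.rfind p ['.'] + 1)) none)
       else "mp4"
     else "mp4") := by
  rcases pvLastDot p with hnd | ⟨a, b, rfl, hb⟩
  · -- no dot anywhere: both default to "mp4"
    have hrf : PySem.Chars.rfind p ['.'] = -1 := by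
      unfold PySem.Chars.rfind; exact pvRfindGo_none hnd _
    have hin : PySem.Chars.isIn ['.'] p = false := by
      unfold PySem.Chars.isIn
      have hf : PySem.Chars.find p ['.'] = -1 :=
        (PySem.Chars.find_eq_neg_one_iff p ['.']).mpr
          (fun hinf => hnd (hinf.subset (by simp)))
      simp [hf]
    rw [pvExtLoop_none hnd]
    simp [hrf, hin]
  · -- p = a ++ '.' :: b with no dot in b: both compute on ext = b
    have hrf : PySem.Chars.rfind (a ++ '.' :: b) ['.'] = (a.length : Int) := pvRfind_eq hb
    have hsl : PySem.Chars.slice (a ++ '.' :: b) (some ((a.length : Int) + 1)) none = b := by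
      rw [PySem.Chars.slice_eq_listSlice]
      rw [show ((a.length : Int) + 1) = ((a.length + 1 : Nat) : Int) by push_cast; ring]
      rw [PySem.List.slice_from_natCast]
      rw [show a ++ '.' :: b = (a ++ ['.']) ++ b by simp]
      rw [show a.length + 1 = (a ++ ['.']).length by simp]
      exact List.drop_left
    have hne : ((a.length : Int) ≠ -1) := by omega
    cases hE : pvExtLoop (a ++ '.' :: b) ["mp4".toList, "mkv".toList, "avi".toList, "mov".toList,
        "wmv".toList, "flv".toList, "webm".toList, "m3u8".toList] with
    | none =>
      have hin : PySem.Chars.isIn ['.'] (a ++ '.' :: b) = true := by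
        unfold PySem.Chars.isIn
        have hf : PySem.Chars.find (a ++ '.' :: b) ['.'] ≠ -1 :=
          (PySem.Chars.find_ne_neg_one_iff _ ['.']).mpr ⟨a, b, by simp⟩
        simp [hf]
      have hlast : PySem.List.pyGet? (PySem.Chars.splitOn (a ++ '.' :: b) ['.']) (-1) = some b := by
        rw [PySem.List.pyGet?_neg_one]
        unfold PySem.Chars.splitOn
        exact pvSplitGo_last hb _ a [] [] (by simp)
      rw [hin, hlast, hrf, hsl]
      simp [hne]
    | some e =>
      rcases pvExtLoop_some hE with ⟨hend, hmem⟩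
      have hsuf : ('.' :: e) <:+ (a ++ '.' :: b) := (PySem.Chars.endswith_iff _ _).mp hend
      have hdot : '.' ∉ e := by
        fin_cases hmem <;> decide
      have hcond : (decide (e.length ≤ 4) && PySem.Chars.strIsalnum e) = true := by
        fin_cases hmem <;> decide
      have heb : e = b := pvSuffixUnique hb hdot hsuf
      rw [hrf, hsl, ← heb, hcond]
      simp [hne]

-- ===== VERDICT (by name: the statement is the Claim_ definition above) =====
theorem get_media_type_from_url_py_spec : Claim_equal_get_media_type_from_url_py := by
  intro url _
  unfold Spec_get_media_type_from_url_py
  unfold get_media_type_from_url_py get_media_type_from_url_py_alt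
  simp only [PySem.Chars.split?, List.isEmpty_cons, Bool.false_eq_true, if_false]
  cases h0 : PySem.List.pyGet? (PySem.Chars.splitOn url.toList ['?']) 0 with
  | none => rfl
  | some first => simpa using pvBody_eq (PySem.Chars.lower first)
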